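-- pv_equiv track=rewrite | github.com/Evan-Gao/SLTK | sltk/utils/span_prf.py | bin_precision
-- ===== SOURCE A (Python) =====
-- def bin_precision(g_spans, p_spans):
--     anss_l = [0] * len(p_spans)
--     for i, p in enumerate(p_spans):
--         for g in g_spans:
--             if set(range(g[0], g[1])).intersection(set(range(p[0], p[1]))):
--                 anss_l[i] = 1
--                 break
--     return anss_l
-- ===== SOURCE B (Python) =====
-- def bin_precision(g_spans, p_spans):
--     return [1 if any(max(g0, p0) < min(g1, p1) for g0, g1 in g_spans) else 0
--             for p0, p1 in p_spans]
-- ===== Notes on version B (the rewrite author's own statement) =====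
-- stated objective: faster
-- what changed: Replaces materialising set(range(...)) for every gold/predicted pair and intersecting them with a constant-time interval-overlap test max(g0,p0) < min(g1,p1) inside an any() comprehension.
import Mathlib
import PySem

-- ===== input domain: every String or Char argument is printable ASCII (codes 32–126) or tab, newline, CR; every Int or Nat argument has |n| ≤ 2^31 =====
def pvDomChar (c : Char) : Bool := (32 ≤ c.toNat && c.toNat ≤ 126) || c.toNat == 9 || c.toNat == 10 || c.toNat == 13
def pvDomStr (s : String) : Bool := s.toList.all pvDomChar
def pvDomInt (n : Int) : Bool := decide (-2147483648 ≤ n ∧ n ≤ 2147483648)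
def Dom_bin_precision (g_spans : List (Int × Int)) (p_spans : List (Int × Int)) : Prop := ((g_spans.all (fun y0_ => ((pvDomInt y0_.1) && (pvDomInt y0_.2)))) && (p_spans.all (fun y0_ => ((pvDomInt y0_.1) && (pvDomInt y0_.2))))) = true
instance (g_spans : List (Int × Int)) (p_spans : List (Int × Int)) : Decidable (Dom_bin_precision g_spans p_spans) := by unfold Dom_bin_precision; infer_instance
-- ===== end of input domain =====

-- B replaces per-pair set(range(..)) materialisation+intersection by a constant-time
-- interval-overlap comparison (objective: faster).


-- ===== PORT A =====
-- inner 'for g in g_spans: if set(range(g[0],g[1])) & set(range(p[0],p[1])): anss_l[i]=1; break'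
-- set(range(a,b)): a range's elements are already distinct and in order (PySem.List.nodup_pyRange_one),
-- so 'PySem.List.pyRange a b 1' is itself the PySem.Set value of set(range(a,b)).
def pvInnerA (anss : List Int) (i : Nat) (p : Int × Int) : List (Int × Int) → List Int
  | [] => anss
  | g :: rest =>
    if (PySem.Set.inter (PySem.List.pyRange g.1 g.2 1)
        (PySem.List.pyRange p.1 p.2 1)) ≠ [] then
      anss.set i 1
    else pvInnerA anss i p rest

def bin_precision (g_spans : List (Int × Int)) (p_spans : List (Int × Int)) : List Int :=
  (PySem.List.enumerate p_spans 0).foldl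
    (fun anss ip => pvInnerA anss ip.1.toNat ip.2 g_spans)
    (List.replicate p_spans.length (0 : Int))

-- ===== PORT B =====
def bin_precision_alt (g_spans : List (Int × Int)) (p_spans : List (Int × Int)) : List Int :=
  p_spans.map (fun p => if g_spans.any (fun g => max g.1 p.1 < min g.2 p.2) then 1 else 0)

-- ===== PRECONDITION & SPEC =====
def Spec_bin_precision (g_spans : List (Int × Int)) (p_spans : List (Int × Int)) (out : List Int) : Prop := out = bin_precision_alt g_spans p_spans
instance (g_spans : List (Int × Int)) (p_spans : List (Int × Int)) (out : List Int) : Decidable (Spec_bin_precision g_spans p_spans out) := by unfold Spec_bin_precision; infer_instance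

-- ===== CLAIM (what is proved, stated in full; the proofs are below) =====
def Claim_equal_bin_precision : Prop := ∀ (g_spans : List (Int × Int)) (p_spans : List (Int × Int)), Dom_bin_precision g_spans p_spans → Spec_bin_precision g_spans p_spans (bin_precision g_spans p_spans)

-- ===== LEMMAS AND PROOFS =====

-- set(range(a,b)) ∩ set(range(c,d)) is nonempty iff the intervals overlap arithmetically
theorem pv_inter_ne_nil_iff (a b c d : Int) :
    ((PySem.Set.inter (PySem.List.pyRange a b 1)
        (PySem.List.pyRange c d 1)) ≠ []) ↔ max a c < min b d := by
  have hmem : (∃ x, x ∈ (PySem.Set.inter (PySem.List.pyRange a b 1)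
      (PySem.List.pyRange c d 1))) ↔ max a c < min b d := by
    simp only [PySem.Set.mem_inter, PySem.List.mem_pyRange_one]
    constructor
    · rintro ⟨x, hx⟩; omega
    · intro h; exact ⟨max a c, by omega⟩
  rw [← hmem]
  constructor
  · intro h; exact List.exists_mem_of_ne_nil _ h
  · rintro ⟨x, hx⟩ hnil; rw [hnil] at hx; cases hx

theorem pvInnerA_eq (anss : List Int) (i : Nat) (p : Int × Int) (gs : List (Int × Int)) :
    pvInnerA anss i p gs =
      if gs.any (fun g => max g.1 p.1 < min g.2 p.2) then anss.set i 1 else anss := by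
  induction gs with
  | nil => simp [pvInnerA]
  | cons g rest ih =>
    simp only [pvInnerA, List.any_cons]
    by_cases h : max g.1 p.1 < min g.2 p.2
    · rw [if_pos ((pv_inter_ne_nil_iff g.1 g.2 p.1 p.2).mpr h)]
      simp [h]
    · rw [if_neg (fun hc => h ((pv_inter_ne_nil_iff g.1 g.2 p.1 p.2).mp hc)), ih]
      simp only [decide_eq_false h, Bool.false_or]

theorem pv_fold_inv (g_spans : List (Int × Int)) (ps : List (Int × Int))
    (pre : List Int) :
    (PySem.List.enumerate ps (pre.length : Int)).foldl
        (fun anss ip => pvInnerA anss ip.1.toNat ip.2 g_spans)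
        (pre ++ List.replicate ps.length (0 : Int)) =
      pre ++ ps.map (fun p => if g_spans.any (fun g => max g.1 p.1 < min g.2 p.2) then 1 else 0) := by
  induction ps generalizing pre with
  | nil => simp [PySem.List.enumerate]
  | cons p rest ih =>
    have hcons : PySem.List.enumerate (p :: rest) (pre.length : Int) =
        ((pre.length : Int), p) :: PySem.List.enumerate rest ((pre.length : Int) + 1) := by
      simp [PySem.List.enumerate]
    rw [hcons, List.foldl_cons, pvInnerA_eq]
    by_cases h : g_spans.any (fun g => max g.1 p.1 < min g.2 p.2)
    · rw [if_pos h]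
      have hset : (pre ++ List.replicate (p :: rest).length (0 : Int)).set
          ((pre.length : Int)).toNat 1 = (pre ++ [1]) ++ List.replicate rest.length (0 : Int) := by
        simp [List.replicate_succ, List.set_append_right _ _ (le_refl pre.length)]
      rw [hset]
      have := ih (pre ++ [1])
      simp only [List.length_append, List.length_cons, List.length_nil, Nat.zero_add] at this
      push_cast at this
      rw [this]
      simp only [List.map_cons, if_pos h, List.append_assoc, List.singleton_append]
    · rw [if_neg h]
      have hrep : pre ++ List.replicate (p :: rest).length (0 : Int) =
          (pre ++ [0]) ++ List.replicate rest.length (0 : Int) := by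
        simp [List.replicate_succ]
      rw [hrep]
      have := ih (pre ++ [0])
      simp only [List.length_append, List.length_cons, List.length_nil, Nat.zero_add] at this
      push_cast at this
      rw [this]
      simp only [List.map_cons, if_neg h, List.append_assoc, List.singleton_append]

-- ===== VERDICT (by name: the statement is the Claim_ definition above) =====
theorem bin_precision_spec : Claim_equal_bin_precision := by
  intro g_spans p_spans _
  show bin_precision g_spans p_spans = bin_precision_alt g_spans p_spans
  have := pv_fold_inv g_spans p_spans []
  simpa [bin_precision, bin_precision_alt] using this
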